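-- pv_equiv track=rewrite | github.com/pro0255/Text-Processing-using-Neural-Networks | src/utils/load_json.py | correct_single_quote_JSON
-- ===== SOURCE A (Python) =====
-- def correct_single_quote_JSON(s):
--     rstr = ""
--     escaped = False
--
--     for c in s:
--
--         if c == "'" and not escaped:
--             c = '"'  # replace single with double quote
--
--         elif c == "'" and escaped:
--             rstr = rstr[:-1]  # remove escape character before single quotes
--
--         elif c == '"':
--             c = "\\" + c  # escape existing double quotes
--
--         escaped = c == "\\"  # check for an escape character
--         rstr += c  # append the correct json
--
--     return rstr
-- ===== SOURCE B (Python) =====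
-- def correct_single_quote_JSON(s):
--     out = []
--     i = 0
--     n = len(s)
--     while i < n:
--         c = s[i]
--         if c == '"':
--             out.append('\\"')
--             i += 1
--         elif c == "\\" and i + 1 < n and s[i + 1] == "'":
--             out.append("'")
--             i += 2
--         elif c == "'":
--             out.append('"')
--             i += 1
--         else:
--             out.append(c)
--             i += 1
--     return "".join(out)
-- ===== Notes on version B (the rewrite author's own statement) =====
-- stated objective: alternative
-- what changed: Replaces A's character-by-character FSM with a trailing escape-state flag and rstr[:-1] slicing by a single lookahead pass that consumes one or two source characters per step and joins the pieces at the end.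
import Mathlib
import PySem

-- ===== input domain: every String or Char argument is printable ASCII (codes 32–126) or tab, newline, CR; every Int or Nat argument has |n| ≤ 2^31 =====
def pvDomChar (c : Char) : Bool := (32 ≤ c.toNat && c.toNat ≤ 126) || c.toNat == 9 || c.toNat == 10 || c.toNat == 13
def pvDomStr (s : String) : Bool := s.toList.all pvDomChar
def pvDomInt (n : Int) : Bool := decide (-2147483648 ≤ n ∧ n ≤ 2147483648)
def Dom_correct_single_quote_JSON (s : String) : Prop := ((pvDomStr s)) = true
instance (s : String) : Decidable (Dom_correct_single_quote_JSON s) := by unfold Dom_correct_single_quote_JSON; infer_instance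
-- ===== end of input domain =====

-- B replaces A's trailing-escaped-flag FSM (with string slicing to undo a backslash)
-- by a single lookahead pass consuming one or two characters per step; objective: alternative.


-- ===== PORT A =====
-- state = (rstr as list of chars, escaped); rstr[:-1] is List.dropLast; exact on any input
def aStep (st : List Char × Bool) (c : Char) : List Char × Bool :=
  if c = '\'' ∧ st.2 = false then (st.1 ++ ['"'], false)          -- '"' == "\\" is False
  else if c = '\'' ∧ st.2 = true then (st.1.dropLast ++ ['\''], false)
  else if c = '"' then (st.1 ++ ['\\', '"'], false)               -- "\\\"" == "\\" is False
  else (st.1 ++ [c], c = '\\')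

def correct_single_quote_JSON (s : String) : String :=
  String.ofList (s.toList.foldl aStep ([], false)).1

-- ===== PORT B =====
-- Source B's while loop consuming one or two source characters per iteration
def altGo : List Char → List Char
  | [] => []
  | '"' :: rest => '\\' :: '"' :: altGo rest
  | '\\' :: '\'' :: rest => '\'' :: altGo rest
  | '\\' :: rest => '\\' :: altGo rest
  | '\'' :: rest => '"' :: altGo rest
  | c :: rest => c :: altGo rest

def correct_single_quote_JSON_alt (s : String) : String :=
  String.ofList (altGo s.toList)

-- ===== PRECONDITION & SPEC =====
def Spec_correct_single_quote_JSON (s : String) (out : String) : Prop := out = correct_single_quote_JSON_alt s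
instance (s : String) (out : String) : Decidable (Spec_correct_single_quote_JSON s out) := by unfold Spec_correct_single_quote_JSON; infer_instance

-- ===== CLAIM (what is proved, stated in full; the proofs are below) =====
def Claim_equal_correct_single_quote_JSON : Prop := ∀ (s : String), Dom_correct_single_quote_JSON s → Spec_correct_single_quote_JSON s (correct_single_quote_JSON s)

-- ===== LEMMAS AND PROOFS =====

theorem altGo_cons_other (c : Char) (rest : List Char) (h2 : c ≠ '"') (h3 : c ≠ '\\') (h1 : c ≠ '\'') : altGo (c :: rest) = c :: altGo rest := by
  rw [altGo.eq_def]
  split <;> simp_all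

-- Invariant: from an unescaped state the fold produces acc ++ altGo l; from an escaped
-- state (whose accumulator necessarily ends in a backslash) it produces acc ++ altGo ('\\' :: l).
theorem foldl_aStep_spec (l : List Char) : ∀ (acc : List Char),
    (l.foldl aStep (acc, false)).1 = acc ++ altGo l ∧
    (l.foldl aStep (acc ++ ['\\'], true)).1 = acc ++ altGo ('\\' :: l) := by
  induction l with
  | nil => intro acc; simp [altGo]
  | cons c rest ih =>
    intro acc
    constructor
    · by_cases h1 : c = '\''
      · subst h1
        simpa [List.foldl, aStep, altGo] using (ih (acc ++ ['"'])).1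
      · by_cases h2 : c = '"'
        · subst h2
          simpa [List.foldl, aStep, altGo] using (ih (acc ++ ['\\', '"'])).1
        · by_cases h3 : c = '\\'
          · subst h3
            simpa [List.foldl, aStep] using (ih acc).2
          · have := (ih (acc ++ [c])).1
            simp [List.foldl, aStep, h1, h2, h3, altGo_cons_other _ _ h2 h3 h1, this]
    · by_cases h1 : c = '\''
      · subst h1
        have := (ih (acc ++ ['\''])).1
        simp [List.foldl, aStep, altGo, this]
      · by_cases h2 : c = '"'
        · subst h2
          have := (ih (acc ++ ['\\', '\\', '"'])).1
          simp [List.foldl, aStep, altGo, this]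
        · by_cases h3 : c = '\\'
          · subst h3
            have := (ih (acc ++ ['\\'])).2
            simp only [List.append_assoc] at this
            simp [List.foldl, aStep, altGo]
            simpa using this
          · have := (ih (acc ++ ['\\', c])).1
            simp [List.foldl, aStep, h1, h2, h3, altGo, this]

-- ===== VERDICT (by name: the statement is the Claim_ definition above) =====
theorem correct_single_quote_JSON_spec : Claim_equal_correct_single_quote_JSON := by
  intro s _
  unfold Spec_correct_single_quote_JSON correct_single_quote_JSON correct_single_quote_JSON_alt
  have h := (foldl_aStep_spec s.toList []).1
  simp at h
  rw [h]
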